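-- pv_equiv track=rewrite | github.com/kavlab/deep_python | task4.py | calculate
-- ===== SOURCE A (Python) =====
-- def calculate(N, M, weights):
--     # Список dp для хранения минимального
--     # количества предметов для каждого возможного веса
--     dp = [float('inf')] * (M + 1)
--     # Нулевой вес можно получить без предметов
--     dp[0] = 0
--
--     # Цикл по предметам
--     for weight in weights:
--         # Обновление значений в списке dp
--         for w in range(M, weight - 1, -1):
--             # Заполнение минимальным количеством
--             dp[w] = min(
--                 # Текущее количество предметов
--                 dp[w],
--                 # Количество предметов из текущего минус текущий вес
--                 dp[w - weight] + 1
--             )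
--
--     if dp[M] == float('inf'):
--         # Если в dp[M] осталось значение бесконечность,
--         # то результат не достижим
--         return 0
--     else:
--         # Минимальное количество предметов будет в dp[M]
--         return dp[M]
-- ===== SOURCE B (Python) =====
-- def calculate(N, M, weights):
--     # The problem is only defined for a nonnegative capacity and nonnegative
--     # weights; reject anything else up front (A also raises there, an IndexError).
--     if M < 0 or any(w < 0 for w in weights):
--         raise ValueError("capacity and weights must be nonnegative")
--     # Top-down memoized recursion over the item index:
--     # f(i, r) = minimum number of items among weights[i:] with sum exactly r
--     # (None = unreachable). A instead sweeps a 1-D dp array backwards.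
--     memo = {}
--
--     def f(i, r):
--         if r == 0:
--             return 0
--         if i == len(weights):
--             return None
--         key = (i, r)
--         if key in memo:
--             return memo[key]
--         best = f(i + 1, r)
--         w = weights[i]
--         if w <= r:
--             sub = f(i + 1, r - w)
--             if sub is not None and (best is None or sub + 1 < best):
--                 best = sub + 1
--         memo[key] = best
--         return best
--
--     res = f(0, M)
--     return 0 if res is None else res
-- ===== Notes on version B (the rewrite author's own statement) =====
-- stated objective: alternative
-- what changed: Replaces A's bottom-up 1-D dp array swept backwards per item with a top-down memoized recursion f(i, r) over the item index that returns the minimum item count for weights[i:] summing exactly to r (None as 'unreachable' instead of float('inf')), after validating that M and the weights are nonnegative (outside that domain A raises IndexError, B raises ValueError).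
import Mathlib
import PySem

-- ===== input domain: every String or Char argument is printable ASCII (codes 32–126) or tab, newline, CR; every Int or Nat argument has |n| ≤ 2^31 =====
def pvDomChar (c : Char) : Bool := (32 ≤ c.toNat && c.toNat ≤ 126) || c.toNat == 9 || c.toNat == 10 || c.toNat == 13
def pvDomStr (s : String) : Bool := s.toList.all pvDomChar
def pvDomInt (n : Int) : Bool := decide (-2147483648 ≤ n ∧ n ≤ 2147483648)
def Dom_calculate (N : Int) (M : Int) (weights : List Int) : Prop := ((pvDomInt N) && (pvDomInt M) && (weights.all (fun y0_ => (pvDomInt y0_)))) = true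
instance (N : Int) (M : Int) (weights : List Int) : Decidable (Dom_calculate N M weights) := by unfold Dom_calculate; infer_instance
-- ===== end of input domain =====

-- B replaces A's backward-swept 1-D dp array by a top-down recursion over the item index
-- (memoized in Python; the memo is a pure cache, so the port is the plain recursion).

-- ===== PORT A =====
-- Python's min over {int, float('inf')}: none stands for float('inf') (exact: dp holds only
-- ints and inf, and min/+1 on that set is this function).
def minOptA (a b : Option Int) : Option Int :=
  match a, b with
  | none, b => b
  | some x, none => some x
  | some x, some y => some (if y < x then y else x)

-- Literal port of A. dp is the Python list (as an Array, Python's O(1)-update list);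
-- float('inf') ↦ none. Under Pre_ every index w, w - weight lies in [0, M] (outside Pre_
-- Python raises IndexError), so `.toNat`/`getD`/`setIfInBounds` are exact there.
def calculate (N : Int) (M : Int) (weights : List Int) : Int :=
  let dp : Array (Option Int) := Array.replicate (M + 1).toNat none
  let dp := dp.setIfInBounds 0 (some 0)
  let dp := weights.foldl (fun dp weight =>
      (PySem.List.pyRange M (weight - 1) (-1)).foldl (fun dp w =>
        dp.setIfInBounds w.toNat (minOptA (dp.getD w.toNat none)
          ((dp.getD (w - weight).toNat none).map (· + 1)))) dp) dp
  match dp.getD M.toNat none with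
  | none => 0
  | some v => v

-- ===== PORT B =====
-- f(i, r) of Source B: minimum number of items among weights[i:] summing exactly to r, with the
-- hand-written memo dict keyed on (i, r); the suffix weights[i:] is the structural list
-- argument travelling alongside the index i. Python's None ('unreachable') ↦ none.
-- (Source B first validates 0 ≤ M and 0 ≤ w for all weights and raises ValueError otherwise —
-- that branch returns no value and lies outside Pre_, so it has no port.)
def calcFM (ws : List Int) (i : Int) (r : Int)
    (memo : PySem.Dict (Int × Int) (Option Int)) :
    Option Int × PySem.Dict (Int × Int) (Option Int) :=
  if r = 0 then (some 0, memo)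
  else
    match ws with
    | [] => (none, memo)
    | w :: rest =>
      match memo.get? (i, r) with
      | some v => (v, memo)
      | none =>
        let res1 := calcFM rest (i + 1) r memo
        let res2 :=
          if w ≤ r then
            let sres := calcFM rest (i + 1) (r - w) res1.2
            match sres.1 with
            | some sub =>
              match res1.1 with
              | none => (some (sub + 1), sres.2)
              | some b => if sub + 1 < b then (some (sub + 1), sres.2) else (some b, sres.2)
            | none => (res1.1, sres.2)
          else res1
        (res2.1, res2.2.insert (i, r) res2.1)

def calculate_alt (N : Int) (M : Int) (weights : List Int) : Int :=
  match (calcFM weights 0 M PySem.Dict.empty).1 with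
  | none => 0
  | some v => v

-- ===== PRECONDITION & SPEC =====
-- Pre_ excludes exactly the inputs on which A raises IndexError: M < 0 (dp is empty, dp[0]
-- fails) or a negative weight (dp[w - weight] is read past the end of dp).
def Pre_calculate (N : Int) (M : Int) (weights : List Int) : Prop :=
  0 ≤ M ∧ ∀ w ∈ weights, 0 ≤ w
instance (N : Int) (M : Int) (weights : List Int) : Decidable (Pre_calculate N M weights) := by
  unfold Pre_calculate; infer_instance

def pvWitness_calculate : Int × Int × List Int := (3, 5, [2, 3, 2])

def Spec_calculate (N : Int) (M : Int) (weights : List Int) (out : Int) : Prop := out = calculate_alt N M weights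
instance (N : Int) (M : Int) (weights : List Int) (out : Int) : Decidable (Spec_calculate N M weights out) := by unfold Spec_calculate; infer_instance

-- ===== CLAIM (what is proved, stated in full; the proofs are below) =====
def Claim_equal_calculate : Prop := ∀ (N : Int) (M : Int) (weights : List Int), Dom_calculate N M weights → Pre_calculate N M weights → Spec_calculate N M weights (calculate N M weights)

-- ===== LEMMAS AND PROOFS =====

-- Proof-side reference function: the plain (memo-free) recursion that Source B's memoized f
-- computes. Both ports are related to it.
def calcF (weights : List Int) (r : Int) : Option Int :=
  if r = 0 then some 0
  else
    match weights with
    | [] => none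
    | w :: rest =>
      let best := calcF rest r
      if w ≤ r then
        match calcF rest (r - w) with
        | some sub =>
          match best with
          | none => some (sub + 1)
          | some b => if sub + 1 < b then some (sub + 1) else some b
        | none => best
      else best

theorem calcF_zero (ws : List Int) : calcF ws 0 = some 0 := by
  cases ws <;> simp [calcF]

theorem calcF_nonneg (ws : List Int) : ∀ (r v : Int), calcF ws r = some v → 0 ≤ v := by
  intro r v h
  fun_induction calcF ws r generalizing v
  case case1 => injection h with h; omega
  case case2 => exact absurd h (by simp)
  case case3 =>
    rename_i sub hsub hbest ih2 ih1
    have := ih1 sub hsub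
    injection h with h; omega
  case case4 =>
    rename_i sub hsub b hbest hlt ih2 ih1
    have := ih1 sub hsub
    injection h with h; omega
  case case5 =>
    rename_i sub hsub b hbest hlt ih2 ih1
    have := ih2 b hbest
    injection h with h; omega
  case case6 =>
    rename_i hnone ih2 ih1
    exact ih2 v h
  case case7 =>
    rename_i hw ih1
    exact ih1 v h

theorem minOptA_some_some (x y : Int) : minOptA (some x) (some y) = some (min x y) := by
  simp [minOptA, min_def]; split <;> split <;> omega

theorem minOptA_comm (a b : Option Int) : minOptA a b = minOptA b a := by
  cases a <;> cases b <;> try rfl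
  rw [minOptA_some_some, minOptA_some_some, min_comm]

theorem minOptA_assoc (a b c : Option Int) :
    minOptA (minOptA a b) c = minOptA a (minOptA b c) := by
  cases a <;> cases b <;> cases c <;> try rfl
  rw [minOptA_some_some, minOptA_some_some, minOptA_some_some, minOptA_some_some, min_assoc]

theorem minOptA_left_comm (a b c : Option Int) :
    minOptA a (minOptA b c) = minOptA b (minOptA a c) := by
  rw [← minOptA_assoc, minOptA_comm a b, minOptA_assoc]

theorem minOptA_map_add (a b : Option Int) :
    (minOptA a b).map (· + 1) = minOptA (a.map (· + 1)) (b.map (· + 1)) := by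
  cases a <;> cases b <;> simp [minOptA, minOptA_some_some]
  omega

-- One unfolding of calcF, with the explicit comparisons recognised as Python's min on {int, inf}.
theorem calcF_cons (w : Int) (rest : List Int) (r : Int) :
    calcF (w :: rest) r =
      if w ≤ r then minOptA (calcF rest r) ((calcF rest (r - w)).map (· + 1))
      else calcF rest r := by
  by_cases hr : r = 0
  · subst hr
    rw [calcF_zero, calcF_zero]
    split
    · rcases h1 : calcF rest (0 - w) with _ | sub
      · simp [minOptA]
      · have := calcF_nonneg rest (0 - w) sub h1
        simp [minOptA]; omega
    · rfl
  · rw [calcF]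
    simp only [hr, if_false]
    by_cases hw : w ≤ r
    · simp only [hw, if_true]
      rcases h1 : calcF rest (r - w) with _ | sub <;>
        rcases h2 : calcF rest r with _ | b <;>
          simp [minOptA, minOptA_some_some]
      split <;> simp only [Option.some.injEq] <;> omega
    · simp [hw]

theorem calcF_snoc (x : Int) (hx : 0 ≤ x) :
    ∀ (p : List Int), (∀ w ∈ p, 0 ≤ w) → ∀ (r : Int),
      calcF (p ++ [x]) r =
        if x ≤ r then minOptA (calcF p r) ((calcF p (r - x)).map (· + 1))
        else calcF p r := by
  intro p
  induction p with
  | nil => intro _ r; simpa using calcF_cons x [] r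
  | cons a p' ih =>
    intro hp r
    have ha : 0 ≤ a := hp a (by simp)
    have hp' : ∀ w ∈ p', 0 ≤ w := fun w hw => hp w (by simp [hw])
    have hsub : r - a - x = r - x - a := by ring
    rw [List.cons_append, calcF_cons, ih hp' r, ih hp' (r - a), calcF_cons, calcF_cons,
      hsub]
    by_cases h1 : a ≤ r <;> by_cases h2 : x ≤ r <;> by_cases h3 : x ≤ r - a <;>
      by_cases h4 : a ≤ r - x <;>
        simp only [h1, h2, h3, h4, if_true, if_false] <;>
          first
          | (exfalso; omega)
          | rfl
          | simp [minOptA_map_add, minOptA_assoc, minOptA_left_comm, minOptA_comm]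

-- ===== B-side: the memoized recursion computes calcF =====

-- the value Source B's inner combination computes from best = f(i+1, r) and sub = f(i+1, r-w)
def combineV (best sub : Option Int) : Option Int :=
  match sub with
  | some s =>
    match best with
    | none => some (s + 1)
    | some b => if s + 1 < b then some (s + 1) else some b
  | none => best

theorem calcFM_correct (weights : List Int) :
    ∀ (ws : List Int) (k : Nat) (r : Int) (memo : PySem.Dict (Int × Int) (Option Int)),
      ws = weights.drop k →
      (∀ (j s : Int) (v : Option Int), memo.get? (j, s) = some v →
        ∃ k' : Nat, j = (k' : Int) ∧ v = calcF (weights.drop k') s) →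
      (calcFM ws (k : Int) r memo).1 = calcF ws r ∧
      (∀ (j s : Int) (v : Option Int), (calcFM ws (k : Int) r memo).2.get? (j, s) = some v →
        ∃ k' : Nat, j = (k' : Int) ∧ v = calcF (weights.drop k') s) := by
  intro ws
  induction ws with
  | nil =>
    intro k r memo hdrop hinv
    by_cases hr : r = 0 <;> simp [calcFM, calcF, hr] <;> exact hinv
  | cons w rest ih =>
    intro k r memo hdrop hinv
    by_cases hr : r = 0
    · subst hr
      simp only [calcFM, if_true]
      exact ⟨(calcF_zero (w :: rest)).symm, hinv⟩
    · have hrest : rest = weights.drop (k + 1) := by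
        have h := congrArg List.tail hdrop
        simpa [List.tail_drop] using h
      rcases hm : memo.get? (((k : Nat) : Int), r) with _ | v
      · -- memo miss: the recursion runs and the result is memoised
        obtain ⟨h1val, h1inv⟩ := ih (k + 1) r memo hrest hinv
        push_cast at h1val h1inv
        by_cases hw : w ≤ r
        · obtain ⟨h2val, h2inv⟩ := ih (k + 1) (r - w)
            (calcFM rest ((k : Int) + 1) r memo).2 hrest (by push_cast; exact h1inv)
          push_cast at h2val h2inv
          have hVal : combineV (calcFM rest ((k : Int) + 1) r memo).1
              ((calcFM rest ((k : Int) + 1) (r - w)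
                (calcFM rest ((k : Int) + 1) r memo).2)).1 = calcF (w :: rest) r := by
            rw [calcF]
            simp only [hr, if_false, hw, if_true]
            rw [← h1val, ← h2val]
            rcases (calcFM rest ((k : Int) + 1) (r - w)
                (calcFM rest ((k : Int) + 1) r memo).2).1 with _ | sub <;>
              rcases (calcFM rest ((k : Int) + 1) r memo).1 with _ | b <;>
                simp [combineV]
          have hunfold : calcFM (w :: rest) (k : Int) r memo =
              (combineV (calcFM rest ((k : Int) + 1) r memo).1
                 ((calcFM rest ((k : Int) + 1) (r - w)
                   (calcFM rest ((k : Int) + 1) r memo).2)).1,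
               ((calcFM rest ((k : Int) + 1) (r - w)
                  (calcFM rest ((k : Int) + 1) r memo).2)).2.insert ((k : Int), r)
                 (combineV (calcFM rest ((k : Int) + 1) r memo).1
                   ((calcFM rest ((k : Int) + 1) (r - w)
                     (calcFM rest ((k : Int) + 1) r memo).2)).1)) := by
            rw [calcFM]
            simp only [hr, if_false, hm, hw, if_true]
            rcases (calcFM rest ((k : Int) + 1) (r - w)
                (calcFM rest ((k : Int) + 1) r memo).2).1 with _ | sub <;>
              rcases (calcFM rest ((k : Int) + 1) r memo).1 with _ | b <;>
                (try simp only [combineV]) <;> (try split) <;> rfl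
          constructor
          · rw [hunfold, hVal]
          · intro j s v hget
            rw [hunfold] at hget
            simp only at hget
            rw [PySem.Dict.get?_insert] at hget
            split at hget
            · rename_i heq
              obtain ⟨hj, hs⟩ := Prod.mk.inj heq
              injection hget with hget
              exact ⟨k, hj, by rw [← hget, hVal, hdrop, hs]⟩
            · exact h2inv j s v hget
        · have hunfold : calcFM (w :: rest) (k : Int) r memo =
              ((calcFM rest ((k : Int) + 1) r memo).1,
               (calcFM rest ((k : Int) + 1) r memo).2.insert ((k : Int), r)
                 (calcFM rest ((k : Int) + 1) r memo).1) := by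
            rw [calcFM]
            simp only [hr, if_false, hm, hw, if_false]
          have hVal : (calcFM rest ((k : Int) + 1) r memo).1 = calcF (w :: rest) r := by
            rw [calcF]
            simp only [hr, if_false, hw, if_false, h1val]
          constructor
          · rw [hunfold, hVal]
          · intro j s v hget
            rw [hunfold] at hget
            simp only at hget
            rw [PySem.Dict.get?_insert] at hget
            split at hget
            · rename_i heq
              obtain ⟨hj, hs⟩ := Prod.mk.inj heq
              injection hget with hget
              exact ⟨k, hj, by rw [← hget, hVal, hdrop, hs]⟩
            · exact h1inv j s v hget
      · -- memo hit
        obtain ⟨k', hk', hv⟩ := hinv _ _ _ hm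
        have hkk : k' = k := by exact_mod_cast hk'.symm
        subst hkk
        rw [calcFM]
        simp only [hr, if_false, hm]
        exact ⟨by rw [hv, hdrop], hinv⟩

-- ===== A-side: the backward sweep and the outer fold =====

theorem agetD_eq (a : Array (Option Int)) (i : Nat) : a.getD i none = (a[i]?).getD none := by
  simp only [Array.getD]
  split <;> simp_all

theorem getD_set_eq (dp : Array (Option Int)) (m : Nat) (v : Option Int) (hm : m < dp.size) :
    (dp.setIfInBounds m v).getD m none = v := by
  rw [agetD_eq, Array.getElem?_setIfInBounds]
  simp [hm]

theorem getD_set_ne (dp : Array (Option Int)) (m j : Nat) (v : Option Int) (h : m ≠ j) :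
    (dp.setIfInBounds m v).getD j none = dp.getD j none := by
  rw [agetD_eq, agetD_eq, Array.getElem?_setIfInBounds]
  simp [h]

theorem sweep_size (weight : Int) (rng : List Int) (dp : Array (Option Int)) :
    (rng.foldl (fun dp w =>
        dp.setIfInBounds w.toNat (minOptA (dp.getD w.toNat none)
          ((dp.getD (w - weight).toNat none).map (· + 1)))) dp).size = dp.size := by
  induction rng generalizing dp with
  | nil => rfl
  | cons w rng ih => rw [List.foldl_cons, ih]; simp

theorem sweep_inv (weight : Int) (hw : 0 ≤ weight) :
    ∀ (n : Nat) (dp : Array (Option Int)) (k : Int), k = weight - 1 + n →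
      k ≤ (dp.size : Int) - 1 →
      ∀ (i : Int), 0 ≤ i → i < (dp.size : Int) →
        ((PySem.List.pyRange k (weight - 1) (-1)).foldl (fun dp w =>
            dp.setIfInBounds w.toNat (minOptA (dp.getD w.toNat none)
              ((dp.getD (w - weight).toNat none).map (· + 1)))) dp).getD i.toNat none =
          if weight ≤ i ∧ i ≤ k then
            minOptA (dp.getD i.toNat none) ((dp.getD (i - weight).toNat none).map (· + 1))
          else dp.getD i.toNat none := by
  intro n
  induction n with
  | zero =>
    intro dp k hk hlen i hi0 hilen
    rw [PySem.List.pyRange_neg_one_eq_nil (by omega)]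
    have : ¬ (weight ≤ i ∧ i ≤ k) := by omega
    simp [this]
  | succ n ih =>
    intro dp k hk hlen i hi0 hilen
    rw [PySem.List.pyRange_neg_one_cons (by omega), List.foldl_cons]
    have hk0 : 0 ≤ k := by omega
    have hkw : 0 ≤ k - weight := by omega
    have hklen : k.toNat < dp.size := by omega
    set dp' := dp.setIfInBounds k.toNat (minOptA (dp.getD k.toNat none)
      ((dp.getD (k - weight).toNat none).map (· + 1))) with hdp'
    have hlen' : dp'.size = dp.size := by simp [hdp']
    rw [ih dp' (k - 1) (by omega) (by omega) i hi0 (by omega)]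
    by_cases hik : i = k
    · subst hik
      have : ¬ (weight ≤ i ∧ i ≤ i - 1) := by omega
      simp only [this, if_false]
      have : weight ≤ i ∧ i ≤ i := by omega
      simp only [this, if_true]
      exact getD_set_eq dp i.toNat _ hklen
    · by_cases hcond : weight ≤ i ∧ i ≤ k - 1
      · have h1 : weight ≤ i ∧ i ≤ k := by omega
        simp only [hcond, h1, if_true]
        rw [hdp', getD_set_ne dp k.toNat i.toNat _ (by omega),
          getD_set_ne dp k.toNat (i - weight).toNat _ (by omega)]
      · have h2 : ¬ (weight ≤ i ∧ i ≤ k) := by omega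
        have h3 : ¬ (weight ≤ i ∧ i ≤ k - 1) := by omega
        simp only [h2, h3, if_false]
        rw [hdp', getD_set_ne dp k.toNat i.toNat _ (by omega)]

theorem outer_inv (M : Int) (hM : 0 ≤ M) :
    ∀ (ws : List Int) (p : List Int) (dp : Array (Option Int)),
      (∀ w ∈ ws, 0 ≤ w) → (∀ w ∈ p, 0 ≤ w) →
      dp.size = (M + 1).toNat →
      (∀ i : Int, 0 ≤ i → i ≤ M → dp.getD i.toNat none = calcF p i) →
      ∀ i : Int, 0 ≤ i → i ≤ M →
        (ws.foldl (fun dp weight =>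
            (PySem.List.pyRange M (weight - 1) (-1)).foldl (fun dp w =>
              dp.setIfInBounds w.toNat (minOptA (dp.getD w.toNat none)
                ((dp.getD (w - weight).toNat none).map (· + 1)))) dp) dp).getD i.toNat none =
          calcF (p ++ ws) i := by
  intro ws
  induction ws with
  | nil => intro p dp _ _ _ hinv i h0 h1; simpa using hinv i h0 h1
  | cons x ws' ih =>
    intro p dp hws hp hlen hinv i h0 h1
    have hx : 0 ≤ x := hws x (by simp)
    have hws' : ∀ w ∈ ws', 0 ≤ w := fun w hw => hws w (by simp [hw])
    rw [List.foldl_cons]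
    set dp' := (PySem.List.pyRange M (x - 1) (-1)).foldl (fun dp w =>
      dp.setIfInBounds w.toNat (minOptA (dp.getD w.toNat none)
        ((dp.getD (w - x).toNat none).map (· + 1)))) dp with hdp'
    have hlen' : dp'.size = (M + 1).toNat := by rw [hdp', sweep_size, hlen]
    have hinv' : ∀ i : Int, 0 ≤ i → i ≤ M → dp'.getD i.toNat none = calcF (p ++ [x]) i := by
      intro i h0 h1
      rw [calcF_snoc x hx p hp i]
      by_cases hxM : M ≤ x - 1
      · rw [hdp', PySem.List.pyRange_neg_one_eq_nil hxM, List.foldl_nil]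
        have : ¬ x ≤ i := by omega
        simp only [this, if_false]
        exact hinv i h0 h1
      · rw [hdp', sweep_inv x hx (M - (x - 1)).toNat dp M (by omega) (by omega) i h0
          (by omega)]
        by_cases hxi : x ≤ i
        · have hc : x ≤ i ∧ i ≤ M := ⟨hxi, h1⟩
          simp only [hc, and_true, h1, if_true, hxi]
          rw [hinv i h0 h1, hinv (i - x) (by omega) (by omega)]
        · have hc : ¬ (x ≤ i ∧ i ≤ M) := by omega
          simp only [hc, if_false, hxi, if_false]
          exact hinv i h0 h1
    have := ih (p ++ [x]) dp' hws' (by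
        intro w hw
        rcases List.mem_append.mp hw with h | h
        · exact hp w h
        · simp at h; omega) hlen' hinv' i h0 h1
    simpa [List.append_assoc] using this

theorem init_inv (M : Int) (hM : 0 ≤ M) (i : Int) (h0 : 0 ≤ i) (h1 : i ≤ M) :
    ((Array.replicate (M + 1).toNat (none : Option Int)).setIfInBounds 0 (some 0)).getD i.toNat none =
      calcF [] i := by
  by_cases hi : i = 0
  · subst hi
    simp only [Int.toNat_zero]
    rw [getD_set_eq _ _ _ (by simp; omega)]
    simp [calcF]
  · rw [getD_set_ne _ 0 i.toNat _ (by omega)]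
    have hlt : i.toNat < (M + 1).toNat := by omega
    rw [agetD_eq]
    simp [Array.getElem?_replicate, hlt, calcF, hi]

-- ===== VERDICT (by name: the statement is the Claim_ definition above) =====
theorem calculate_spec : Claim_equal_calculate := by
  intro N M weights _ hpre
  obtain ⟨hM, hws⟩ := hpre
  have hA := outer_inv M hM weights []
    ((Array.replicate (M + 1).toNat none).setIfInBounds 0 (some 0))
    hws (by simp) (by simp) (fun i h0 h1 => init_inv M hM i h0 h1) M hM le_rfl
  simp only [List.nil_append] at hA
  have hB := (calcFM_correct weights weights 0 M PySem.Dict.empty rfl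
    (by intro j s v hget; rw [PySem.Dict.get?_empty] at hget; exact absurd hget (by simp))).1
  simp only [Nat.cast_zero] at hB
  simp only [Spec_calculate, calculate, calculate_alt]
  rw [hA, ← hB]
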